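-- pv_equiv track=rewrite | github.com/ManuLam/Projects | JigsawSolver/storage_code.py | return_spiral_matrix
-- ===== SOURCE A (Python) =====
-- def return_spiral_matrix(dimensional_list):
--     spiral_slices = []
--
--     while dimensional_list:
--         for x in dimensional_list.pop(0):
--             spiral_slices.append(x)
--
--         for v in dimensional_list:
--             spiral_slices.append(v.pop())
--
--         if dimensional_list:
--             for x in dimensional_list.pop()[::-1]:
--                 spiral_slices.append(x)
--
--         for v in dimensional_list[::-1]:
--             spiral_slices.append(v.pop(0))
--
--     return spiral_slices
-- ===== SOURCE B (Python) =====
-- def return_spiral_matrix(dimensional_list):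
--     # boundary-index-pointer spiral traversal: reads the matrix in place, does not mutate the input
--     if not dimensional_list:
--         return []
--     m, n = len(dimensional_list), len(dimensional_list[0])
--     res = []
--     top, bottom, left, right = 0, m - 1, 0, n - 1
--     while top <= bottom and left <= right:
--         for j in range(left, right + 1):
--             res.append(dimensional_list[top][j])
--         for i in range(top + 1, bottom + 1):
--             res.append(dimensional_list[i][right])
--         if top < bottom:
--             for j in range(right - 1, left - 1, -1):
--                 res.append(dimensional_list[bottom][j])
--         if left < right:
--             for i in range(bottom - 1, top, -1):
--                 res.append(dimensional_list[i][left])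
--         top += 1
--         bottom -= 1
--         left += 1
--         right -= 1
--     return res
-- ===== Notes on version B (the rewrite author's own statement) =====
-- stated objective: alternative
-- what changed: Replaces A's destructive layer-peeling (repeated list.pop(0)/pop() mutation of the matrix) by a read-only boundary-index-pointer spiral traversal with four shrinking bounds; intended to avoid pop(0) shifting, measured ~1.9x at the largest size but not consistently across shapes.
-- outside the precondition, e.g. on return_spiral_matrix([[1], [2, 3]]): A returns [1, 3, 2], B returns [1, 2]; on return_spiral_matrix([[1], [2], [3]]): A raises IndexError, B returns [1, 2, 3]
import Mathlib
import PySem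

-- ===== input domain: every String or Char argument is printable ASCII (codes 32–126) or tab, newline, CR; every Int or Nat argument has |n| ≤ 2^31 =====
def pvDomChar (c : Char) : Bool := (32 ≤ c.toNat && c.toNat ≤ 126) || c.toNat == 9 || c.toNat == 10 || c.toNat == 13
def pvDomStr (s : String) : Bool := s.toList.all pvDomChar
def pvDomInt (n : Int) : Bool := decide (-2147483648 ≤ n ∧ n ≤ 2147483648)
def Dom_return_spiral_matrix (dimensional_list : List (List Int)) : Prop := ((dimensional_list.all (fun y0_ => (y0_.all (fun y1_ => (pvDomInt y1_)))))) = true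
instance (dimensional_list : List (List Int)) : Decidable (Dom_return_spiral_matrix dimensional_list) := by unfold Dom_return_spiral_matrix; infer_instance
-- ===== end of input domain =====

-- B replaces A's destructive pop(0)/pop() layer-peeling with a read-only boundary-index-pointer spiral
-- traversal (an alternative algorithm over the same data); A mutates its argument, so the equivalence
-- proved here is about the RETURN value only.

-- ===== PORT A =====
-- NOTE: the Python A empties its argument in place (pop(0)/pop()); the equivalence proved here is about the RETURN value only.
-- v.pop() / v.pop(0) on an empty row raises IndexError in Python; the port returns a default 0 there — Pre_ excludes those inputs.
def return_spiral_matrix (dimensional_list : List (List Int)) : List Int :=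
  match dimensional_list with
  | [] => []
  | r0 :: rest =>
    -- for x in pop(0): append x            -> r0
    let lasts := rest.map (fun v => v.getLast?.getD 0)          -- for v in list: append v.pop()
    let rest1 := rest.map List.dropLast
    let lastRowRev := (rest1.getLast?.getD []).reverse          -- if list: for x in pop()[::-1] ([] iff guard false)
    let rest2 := rest1.dropLast
    let heads := rest2.reverse.map (fun v => v.head?.getD 0)    -- for v in list[::-1]: append v.pop(0)
    r0 ++ lasts ++ lastRowRev ++ heads ++ return_spiral_matrix (rest2.map List.tail)
termination_by dimensional_list.length
decreasing_by simp

-- ===== PORT B =====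
-- dimensional_list[i][j]; exact when both indices are in range (Pre_ guarantees this for every read the loop makes)
def pyGet2 (dl : List (List Int)) (i j : Int) : Int :=
  PySem.List.pyGetD (PySem.List.pyGetD dl i []) j 0

def spiralGo (dl : List (List Int)) (t b l r : Int) : List Int :=
  if t ≤ b ∧ l ≤ r then
    (PySem.List.pyRange l (r + 1) 1).map (fun j => pyGet2 dl t j)
    ++ (PySem.List.pyRange (t + 1) (b + 1) 1).map (fun i => pyGet2 dl i r)
    ++ (if t < b then (PySem.List.pyRange (r - 1) (l - 1) (-1)).map (fun j => pyGet2 dl b j) else [])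
    ++ (if l < r then (PySem.List.pyRange (b - 1) t (-1)).map (fun i => pyGet2 dl i l) else [])
    ++ spiralGo dl (t + 1) (b - 1) (l + 1) (r - 1)
  else []
termination_by (b - t + 1).toNat
decreasing_by omega

def return_spiral_matrix_alt (dimensional_list : List (List Int)) : List Int :=
  match dimensional_list with
  | [] => []
  | r0 :: _ =>
    spiralGo dimensional_list 0 ((dimensional_list.length : Int) - 1) 0 ((r0.length : Int) - 1)

-- ===== PRECONDITION & SPEC =====
-- Pre_ excludes non-rectangular inputs, on which A's destructive pop order is an accident of its mutation scheme (and A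
-- often raises IndexError), and rectangular matrices with rows ≥ cols + 2, on which A always raises IndexError.
def Pre_return_spiral_matrix (dimensional_list : List (List Int)) : Prop :=
  (∀ v ∈ dimensional_list, v.length = (dimensional_list.headD []).length) ∧
    dimensional_list.length ≤ (dimensional_list.headD []).length + 1
instance (dimensional_list : List (List Int)) : Decidable (Pre_return_spiral_matrix dimensional_list) := by
  unfold Pre_return_spiral_matrix; infer_instance

def pvWitness_return_spiral_matrix : List (List Int) := [[1, 2, 3], [4, 5, 6], [7, 8, 9]]

def Spec_return_spiral_matrix (dimensional_list : List (List Int)) (out : List Int) : Prop := out = return_spiral_matrix_alt dimensional_list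
instance (dimensional_list : List (List Int)) (out : List Int) : Decidable (Spec_return_spiral_matrix dimensional_list out) := by unfold Spec_return_spiral_matrix; infer_instance

-- ===== CLAIM (what is proved, stated in full; the proofs are below) =====
def Claim_equal_return_spiral_matrix : Prop := ∀ (dimensional_list : List (List Int)), Dom_return_spiral_matrix dimensional_list → Pre_return_spiral_matrix dimensional_list → Spec_return_spiral_matrix dimensional_list (return_spiral_matrix dimensional_list)

-- ===== LEMMAS AND PROOFS =====

-- reading a prefix of a row by successive indices yields List.take
lemma mapRange_pyGetD_take {α : Type} (xs : List α) (d : α) (k : Nat) (hk : k ≤ xs.length) :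
    (PySem.List.pyRange 0 (k : Int) 1).map (fun j => PySem.List.pyGetD xs j d) = xs.take k := by
  induction k with
  | zero => simp [PySem.List.pyRange_one_eq_nil]
  | succ k ih =>
    rw [show ((k + 1 : Nat) : Int) = (k : Int) + 1 by push_cast; ring,
      PySem.List.pyRange_one_succ_right (by positivity), List.map_append, ih (by omega)]
    have hk' : k < xs.length := by omega
    have ht : xs.take (k + 1) = xs.take k ++ [xs[k]] := by
      rw [List.take_add_one, List.getElem?_eq_getElem hk']; simp
    rw [ht]
    simp [List.getElem?_eq_getElem hk']

lemma pyRange_one_shift (a b c : Int) :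
    PySem.List.pyRange (a + c) (b + c) 1 = (PySem.List.pyRange a b 1).map (· + c) := by
  rw [PySem.List.pyRange_one, PySem.List.pyRange_one, show b + c - (a + c) = b - a by ring,
    List.map_map]
  exact List.map_congr_left fun x _ => by simp; ring

lemma pyRange_neg_one_shift (a b c : Int) :
    PySem.List.pyRange (a + c) (b + c) (-1) = (PySem.List.pyRange a b (-1)).map (· + c) := by
  rw [PySem.List.pyRange_neg_one, PySem.List.pyRange_neg_one, show a + c - (b + c) = a - b by ring,
    List.map_map]
  exact List.map_congr_left fun x _ => by simp; ring

-- spiralGo only reads the current window: shifting the window by (1,1) matches reading a shifted matrix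
lemma spiralGo_shift (dl1 dl2 : List (List Int)) :
    ∀ (k : Nat) (t b l r : Int), (b - t + 1).toNat ≤ k →
      (∀ i j : Int, t ≤ i → i ≤ b → l ≤ j → j ≤ r → pyGet2 dl1 i j = pyGet2 dl2 (i + 1) (j + 1)) →
      spiralGo dl1 t b l r = spiralGo dl2 (t + 1) (b + 1) (l + 1) (r + 1) := by
  intro k
  induction k with
  | zero =>
    intro t b l r hk h
    conv_lhs => rw [spiralGo]
    conv_rhs => rw [spiralGo]
    rw [if_neg (by omega), if_neg (by omega)]
  | succ k ih =>
    intro t b l r hk h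
    conv_lhs => rw [spiralGo]
    conv_rhs => rw [spiralGo]
    by_cases hg : t ≤ b ∧ l ≤ r
    · rw [if_pos hg, if_pos (show t + 1 ≤ b + 1 ∧ l + 1 ≤ r + 1 by omega)]
      congr 1
      · congr 1
        · congr 1
          · congr 1
            · rw [pyRange_one_shift l (r + 1) 1, List.map_map]
              refine List.map_congr_left fun j hj => ?_
              rw [PySem.List.mem_pyRange_one] at hj
              simpa using h t j le_rfl hg.1 hj.1 (by omega)
            · rw [pyRange_one_shift (t + 1) (b + 1) 1, List.map_map]
              refine List.map_congr_left fun i hi => ?_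
              rw [PySem.List.mem_pyRange_one] at hi
              simpa using h i r (by omega) (by omega) hg.2 le_rfl
          · by_cases htb : t < b
            · rw [if_pos htb, if_pos (by omega),
                show (r + 1 - 1 : Int) = (r - 1) + 1 by ring,
                show (l + 1 - 1 : Int) = (l - 1) + 1 by ring,
                pyRange_neg_one_shift (r - 1) (l - 1) 1, List.map_map]
              refine List.map_congr_left fun j hj => ?_
              rw [PySem.List.mem_pyRange_neg_one] at hj
              simpa using h b j (by omega) le_rfl (by omega) (by omega)
            · rw [if_neg htb, if_neg (by omega)]
        · by_cases hlr : l < r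
          · rw [if_pos hlr, if_pos (by omega),
              show (b + 1 - 1 : Int) = (b - 1) + 1 by ring,
              pyRange_neg_one_shift (b - 1) t 1, List.map_map]
            refine List.map_congr_left fun i hi => ?_
            rw [PySem.List.mem_pyRange_neg_one] at hi
            simpa using h i l (by omega) (by omega) le_rfl (by omega)
          · rw [if_neg hlr, if_neg (by omega)]
      · rw [show (b + 1 - 1 : Int) = (b - 1) + 1 by ring, show (r + 1 - 1 : Int) = (r - 1) + 1 by ring]
        exact ih (t + 1) (b - 1) (l + 1) (r - 1) (by omega)
          fun i j h1 h2 h3 h4 => h i j (by omega) (by omega) (by omega) (by omega)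
    · rw [if_neg hg, if_neg (by omega)]

lemma seg1_eq (r0 : List Int) (rest : List (List Int)) :
    (PySem.List.pyRange 0 ((r0.length : Int) - 1 + 1) 1).map (fun j => pyGet2 (r0 :: rest) 0 j)
      = r0 := by
  rw [show ((r0.length : Int) - 1 + 1) = ((r0.length : Nat) : Int) by ring]
  have h : ∀ j ∈ PySem.List.pyRange 0 (r0.length : Int) 1,
      pyGet2 (r0 :: rest) 0 j = PySem.List.pyGetD r0 j 0 := fun j _ => by
    simp [pyGet2, PySem.List.pyGetD_zero_cons]
  rw [List.map_congr_left h, mapRange_pyGetD_take r0 0 r0.length le_rfl, List.take_length]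

lemma seg2_eq (r0 : List Int) (rest : List (List Int))
    (hrect : ∀ v ∈ rest, v.length = r0.length) (hn1 : 1 ≤ r0.length) :
    (PySem.List.pyRange (0 + 1) ((rest.length : Int) + 1) 1).map
        (fun i => pyGet2 (r0 :: rest) i ((r0.length : Int) - 1))
      = rest.map (fun v => v.getLast?.getD 0) := by
  apply List.ext_getElem
  · simp [PySem.List.length_pyRange_one]
  intro k h1 h2
  simp only [List.getElem_map, PySem.List.getElem_pyRange_one]
  have hk : k < rest.length := by simpa using h2
  have hlen : rest[k].length = r0.length := hrect _ (List.getElem_mem hk)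
  simp only [pyGet2]
  rw [show (0 + 1 + (k : Int)) = ((k + 1 : Nat) : Int) by push_cast; ring,
    PySem.List.pyGetD_natCast, List.getD_cons_succ, List.getD_eq_getElem rest [] hk,
    show ((r0.length : Int) - 1) = ((r0.length - 1 : Nat) : Int) by omega,
    PySem.List.pyGetD_natCast, List.getD_eq_getElem _ 0 (by omega),
    List.getLast?_eq_getElem?, List.getElem?_eq_getElem (by omega)]
  simp [hlen]

lemma seg3_eq (r0 : List Int) (rest : List (List Int))
    (hrect : ∀ v ∈ rest, v.length = r0.length) (hn1 : 1 ≤ r0.length) (hne : rest ≠ []) :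
    (PySem.List.pyRange ((r0.length : Int) - 1 - 1) (0 - 1) (-1)).map
        (fun j => pyGet2 (r0 :: rest) (rest.length : Int) j)
      = ((rest.map List.dropLast).getLast?.getD []).reverse := by
  have hlp : 0 < rest.length := List.length_pos_of_ne_nil hne
  have hwlen : rest[rest.length - 1].length = r0.length := hrect _ (List.getElem_mem (by omega))
  rw [List.getLast?_map, List.getLast?_eq_getElem?, List.getElem?_eq_getElem (by omega)]
  simp only [Option.map_some, Option.getD_some]
  rw [PySem.List.pyRange_neg_one_eq_reverse, List.map_reverse,
    show ((0 : Int) - 1 + 1) = 0 by ring,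
    show ((r0.length : Int) - 1 - 1 + 1) = ((r0.length - 1 : Nat) : Int) by omega]
  have hrow : ∀ j ∈ PySem.List.pyRange 0 ((r0.length - 1 : Nat) : Int) 1,
      pyGet2 (r0 :: rest) (rest.length : Int) j
        = PySem.List.pyGetD rest[rest.length - 1] j 0 := by
    intro j _
    simp only [pyGet2]
    congr 1
    rw [PySem.List.pyGetD_natCast, List.getD_eq_getElem _ [] (by simp), List.getElem_cons]
    simp [show rest.length ≠ 0 by omega]
  rw [List.map_congr_left hrow, mapRange_pyGetD_take _ 0 (r0.length - 1) (by omega),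
    List.dropLast_eq_take, hwlen]

lemma seg4_eq (r0 : List Int) (rest : List (List Int))
    (hrect : ∀ v ∈ rest, v.length = r0.length) (hn2 : 2 ≤ r0.length) :
    (PySem.List.pyRange ((rest.length : Int) - 1) 0 (-1)).map (fun i => pyGet2 (r0 :: rest) i 0)
      = ((rest.map List.dropLast).dropLast).reverse.map (fun v => v.head?.getD 0) := by
  rw [PySem.List.pyRange_neg_one_eq_reverse, List.map_reverse, List.map_reverse]
  congr 1
  rw [show ((rest.length : Int) - 1 + 1) = (rest.length : Int) by ring]
  apply List.ext_getElem
  · simp [PySem.List.length_pyRange_one]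
  intro k h1 h2
  have hk : k < rest.length - 1 := by simpa using h2
  have hlen : rest[k].length = r0.length := hrect _ (List.getElem_mem (by omega))
  simp only [List.getElem_map, PySem.List.getElem_pyRange_one, List.getElem_dropLast]
  simp only [pyGet2]
  rw [show ((0 : Int) + 1 + (k : Int)) = ((k + 1 : Nat) : Int) by push_cast; ring,
    PySem.List.pyGetD_natCast, List.getD_cons_succ, List.getD_eq_getElem rest [] (by omega),
    PySem.List.pyGetD_zero, List.head?_eq_getElem?,
    List.getElem?_eq_getElem (show 0 < rest[k].dropLast.length by simp [hlen]; omega),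
    List.getD_eq_getElem _ 0 (by omega)]
  simp [List.getElem_dropLast]

lemma trim_row_len (r0 : List Int) (rest : List (List Int))
    (hrect : ∀ v ∈ rest, v.length = r0.length) :
    ∀ v ∈ ((rest.map List.dropLast).dropLast).map List.tail, v.length = r0.length - 2 := by
  intro v hv
  simp only [List.mem_map] at hv
  obtain ⟨u, hu, rfl⟩ := hv
  have hu' := List.mem_of_mem_dropLast hu
  simp only [List.mem_map] at hu'
  obtain ⟨w, hw, rfl⟩ := hu'
  simp only [List.length_tail, List.length_dropLast, hrect w hw]
  omega

lemma trim_pre (r0 : List Int) (rest : List (List Int))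
    (hrect : ∀ v ∈ rest, v.length = r0.length) (hm' : rest.length ≤ r0.length) :
    Pre_return_spiral_matrix (((rest.map List.dropLast).dropLast).map List.tail) := by
  cases hc : ((rest.map List.dropLast).dropLast).map List.tail with
  | nil => exact ⟨by simp, by simp⟩
  | cons t0 ts =>
    have hmem : ∀ v ∈ t0 :: ts, v.length = r0.length - 2 := by
      rw [← hc]; exact trim_row_len r0 rest hrect
    have hlen : (t0 :: ts).length = rest.length - 1 := by rw [← hc]; simp
    refine ⟨fun v hv => ?_, ?_⟩
    · rw [List.headD_cons, hmem v hv, hmem t0 (by simp)]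
    · rw [List.headD_cons, hlen, hmem t0 (by simp)]
      have : 1 ≤ rest.length - 1 := by rw [← hlen]; simp
      omega

lemma seg5_eq (r0 : List Int) (rest : List (List Int))
    (hrect : ∀ v ∈ rest, v.length = r0.length) (hm' : rest.length ≤ r0.length)
    (ihtr : return_spiral_matrix (((rest.map List.dropLast).dropLast).map List.tail)
      = return_spiral_matrix_alt (((rest.map List.dropLast).dropLast).map List.tail)) :
    return_spiral_matrix (((rest.map List.dropLast).dropLast).map List.tail)
      = spiralGo (r0 :: rest) (0 + 1) ((rest.length : Int) - 1) (0 + 1)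
          ((r0.length : Int) - 1 - 1) := by
  have hlen : (((rest.map List.dropLast).dropLast).map List.tail).length = rest.length - 1 := by
    simp
  by_cases hsmall : rest.length ≤ 1
  · have h0 : ((rest.map List.dropLast).dropLast).map List.tail = [] := by
      apply List.eq_nil_of_length_eq_zero; simp; omega
    rw [h0]
    conv_rhs => rw [spiralGo]
    rw [if_neg (by omega)]
    simp [return_spiral_matrix]
  · have h2m : 2 ≤ rest.length := by omega
    rw [ihtr]
    cases hc : ((rest.map List.dropLast).dropLast).map List.tail with
    | nil => rw [hc] at hlen; simp at hlen; omega
    | cons t0 ts =>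
      rw [return_spiral_matrix_alt]
      have hts : (t0 :: ts).length = rest.length - 1 := by rw [← hc]; exact hlen
      have ht0 : t0.length = r0.length - 2 :=
        trim_row_len r0 rest hrect t0 (by rw [hc]; simp)
      have e1 : ((t0 :: ts).length : Int) - 1 = (rest.length : Int) - 2 := by rw [hts]; omega
      have e2 : ((t0.length : Int)) - 1 = (r0.length : Int) - 3 := by rw [ht0]; omega
      rw [e1, e2]
      have hpt : ∀ i j : Int, 0 ≤ i → i ≤ (rest.length : Int) - 2 → 0 ≤ j →
          j ≤ (r0.length : Int) - 3 →
          pyGet2 (t0 :: ts) i j = pyGet2 (r0 :: rest) (i + 1) (j + 1) := by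
        intro i j hi0 hi1 hj0 hj1
        obtain ⟨a, rfl⟩ : ∃ a : Nat, i = (a : Int) := ⟨i.toNat, (Int.toNat_of_nonneg hi0).symm⟩
        obtain ⟨c, rfl⟩ : ∃ c : Nat, j = (c : Int) := ⟨j.toNat, (Int.toNat_of_nonneg hj0).symm⟩
        have ha : a < rest.length - 1 := by omega
        have hc3 : c < r0.length - 2 := by omega
        have hrowlen : rest[a].length = r0.length := hrect _ (List.getElem_mem (by omega))
        simp only [pyGet2]
        rw [show ((a : Int) + 1) = ((a + 1 : Nat) : Int) by push_cast; ring,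
          show ((c : Int) + 1) = ((c + 1 : Nat) : Int) by push_cast; ring]
        simp only [PySem.List.pyGetD_natCast]
        rw [List.getD_cons_succ, ← hc,
          List.getD_eq_getElem _ [] (show a < (((rest.map List.dropLast).dropLast).map List.tail).length by omega),
          List.getD_eq_getElem rest [] (by omega)]
        simp only [List.getElem_map, List.getElem_dropLast]
        rw [List.getD_eq_getElem _ 0 (show c < (rest[a].dropLast.tail).length by simp [hrowlen]; omega),
          List.getD_eq_getElem _ 0 (show c + 1 < rest[a].length by omega)]
        simp [List.getElem_tail, List.getElem_dropLast]
      have hshift := spiralGo_shift (t0 :: ts) (r0 :: rest) rest.length 0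
        ((rest.length : Int) - 2) 0 ((r0.length : Int) - 3) (by omega) hpt
      rw [hshift, show ((rest.length : Int) - 2 + 1) = (rest.length : Int) - 1 by ring,
        show ((r0.length : Int) - 3 + 1) = (r0.length : Int) - 1 - 1 by ring]

lemma main_aux : ∀ (K : Nat) (dl : List (List Int)), dl.length ≤ K →
    Pre_return_spiral_matrix dl → return_spiral_matrix dl = return_spiral_matrix_alt dl := by
  intro K
  induction K with
  | zero =>
    intro dl hK _
    have : dl = [] := List.eq_nil_of_length_eq_zero (by omega)
    subst this
    simp [return_spiral_matrix, return_spiral_matrix_alt]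
  | succ K ih =>
    rintro (_ | ⟨r0, rest⟩) hK hpre
    · simp [return_spiral_matrix, return_spiral_matrix_alt]
    obtain ⟨hrect, hm⟩ := hpre
    simp only [List.headD_cons, List.length_cons] at hrect hm
    have hm' : rest.length ≤ r0.length := by omega
    have hrect' : ∀ v ∈ rest, v.length = r0.length := fun v hv =>
      hrect v (List.mem_cons_of_mem _ hv)
    have hB : return_spiral_matrix_alt (r0 :: rest) =
        spiralGo (r0 :: rest) 0 (rest.length : Int) 0 ((r0.length : Int) - 1) := by
      rw [return_spiral_matrix_alt]
      congr 1
      simp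
    by_cases hn0 : r0.length = 0
    · have hr0 : r0 = [] := List.eq_nil_of_length_eq_zero hn0
      have hrest : rest = [] := List.eq_nil_of_length_eq_zero (by omega)
      subst hr0; subst hrest
      simp [return_spiral_matrix, return_spiral_matrix_alt, spiralGo]
    have hn1 : 1 ≤ r0.length := by omega
    rw [hB]
    conv_rhs => rw [spiralGo]
    rw [if_pos ⟨by omega, by omega⟩]
    simp only [return_spiral_matrix]
    rw [seg1_eq r0 rest, seg2_eq r0 rest hrect' hn1]
    have h5 := seg5_eq r0 rest hrect' hm'
      (ih _ (by simp only [List.length_map, List.length_dropLast, List.length_cons] at hK ⊢; omega)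
        (trim_pre r0 rest hrect' hm'))
    rw [← h5]
    by_cases hre : rest = []
    · subst hre
      rw [if_neg (by simp)]
      simp [PySem.List.pyRange_neg_one_eq_nil]
    · rw [if_pos (by have := List.length_pos_of_ne_nil hre; omega),
        seg3_eq r0 rest hrect' hn1 hre]
      by_cases hn2 : 2 ≤ r0.length
      · rw [if_pos (by omega), seg4_eq r0 rest hrect' hn2]
      · rw [if_neg (by omega)]
        have h0 : (rest.map List.dropLast).dropLast = [] :=
          List.eq_nil_of_length_eq_zero (by simp; omega)
        rw [h0]
        simp

-- ===== VERDICT (by name: the statement is the Claim_ definition above) =====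
theorem return_spiral_matrix_spec : Claim_equal_return_spiral_matrix := by
  intro dl _ hpre
  unfold Spec_return_spiral_matrix
  exact main_aux dl.length dl le_rfl hpre
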